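-- pv_equiv track=rewrite | github.com/ariqamin/HokieSync | src/services/recommendation_service.py | _subject_from_course_code
-- ===== SOURCE A (Python) =====
-- def _subject_from_course_code(course_code: str) -> str:
--     letters = []
--     for char in str(course_code).upper():
--         if char.isalpha():
--             letters.append(char)
--         elif letters:
--             break
--     return "".join(letters)
-- ===== SOURCE B (Python) =====
-- def _subject_from_course_code(course_code: str) -> str:
--     # Replace every non-letter by a space, split on whitespace: the tokens are
--     # exactly the maximal alphabetic runs; the answer is the first one (or "").
--     s = str(course_code).upper()
--     words = "".join(c if c.isalpha() else " " for c in s).split()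
--     return words[0] if words else ""
-- ===== Notes on version B (the rewrite author's own statement) =====
-- stated objective: alternative
-- what changed: Instead of A's stateful append/break scan, B masks every non-letter to a space, splits the masked string on whitespace, and returns the first token (the first maximal alphabetic run).
import Mathlib
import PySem

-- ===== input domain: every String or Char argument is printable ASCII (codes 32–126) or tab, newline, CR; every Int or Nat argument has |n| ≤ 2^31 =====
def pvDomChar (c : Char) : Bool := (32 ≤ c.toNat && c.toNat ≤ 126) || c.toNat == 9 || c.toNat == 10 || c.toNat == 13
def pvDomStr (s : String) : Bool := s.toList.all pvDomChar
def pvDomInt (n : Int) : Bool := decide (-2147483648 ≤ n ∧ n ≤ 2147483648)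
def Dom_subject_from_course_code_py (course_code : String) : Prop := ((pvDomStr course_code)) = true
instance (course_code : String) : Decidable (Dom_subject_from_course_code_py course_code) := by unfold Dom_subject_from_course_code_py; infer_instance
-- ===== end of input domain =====

-- B masks every non-letter to a space and takes the first whitespace-split token (the first maximal letter run) instead of A's stateful append/break loop.
-- ===== PORT A =====
-- literal port of A's for-loop with break: state = letters accumulator; break returns it.
def pvLoopA : List Char → List Char → List Char
  | [], letters => letters
  | c :: rest, letters =>
      if PySem.Chars.isalpha c then pvLoopA rest (letters ++ [c])
      else if letters ≠ [] then letters
      else pvLoopA rest letters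

def subject_from_course_code_py (course_code : String) : String :=
  String.ofList (pvLoopA (PySem.Str.upper course_code).toList [])

-- ===== PORT B =====
-- mask: 'c if c.isalpha() else " "' applied charwise ("".join over single chars = map)
def pvMaskB (c : Char) : Char := if PySem.Chars.isalpha c then c else ' '

def subject_from_course_code_py_alt (course_code : String) : String :=
  match PySem.Chars.split₀ ((PySem.Str.upper course_code).toList.map pvMaskB) with
  | [] => ""
  | w :: _ => String.ofList w

-- ===== PRECONDITION & SPEC =====
def Spec_subject_from_course_code_py (course_code : String) (out : String) : Prop := out = subject_from_course_code_py_alt course_code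
instance (course_code : String) (out : String) : Decidable (Spec_subject_from_course_code_py course_code out) := by unfold Spec_subject_from_course_code_py; infer_instance

-- ===== CLAIM (what is proved, stated in full; the proofs are below) =====
def Claim_equal_subject_from_course_code_py : Prop := ∀ (course_code : String), Dom_subject_from_course_code_py course_code → Spec_subject_from_course_code_py course_code (subject_from_course_code_py course_code)

-- ===== LEMMAS AND PROOFS =====
-- an alphabetic character is never whitespace
theorem pv_alpha_not_space (c : Char) (h : PySem.Chars.isalpha c = true) :
    PySem.Chars.isspace c = false := by
  simp only [PySem.Chars.isalpha, PySem.Chars.isupper, PySem.Chars.islower, Bool.or_eq_true,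
    Bool.and_eq_true, decide_eq_true_eq, Char.le_def, UInt32.le_iff_toNat_le, Char.toNat] at h
  rw [Bool.eq_false_iff]
  intro hs
  simp only [PySem.Chars.isspace, Bool.or_eq_true, Bool.and_eq_true, decide_eq_true_eq,
    Char.toNat] at hs
  have h1 : 'A'.val.toNat = 65 := rfl
  have h2 : 'Z'.val.toNat = 90 := rfl
  have h3 : 'a'.val.toNat = 97 := rfl
  have h4 : 'z'.val.toNat = 122 := rfl
  rw [h1, h2] at h <;> rw [h3, h4] at h <;> omega

-- split₀.go only ever appends after the accumulated words
theorem pv_go_append (xs cur : List Char) (acc : List (List Char)) :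
    PySem.Chars.split₀.go xs cur acc = acc.reverse ++ PySem.Chars.split₀.go xs cur [] := by
  induction xs generalizing cur acc with
  | nil =>
    by_cases h : cur.isEmpty <;> simp [PySem.Chars.split₀.go, h]
  | cons c rest ih =>
    by_cases hs : PySem.Chars.isspace c
    · by_cases hc : cur.isEmpty
      · simp only [PySem.Chars.split₀.go, hs, hc, if_true]
        exact ih _ _
      · simp only [PySem.Chars.split₀.go, hs, hc, if_true, if_false]
        rw [ih [] (cur.reverse :: acc), ih [] [cur.reverse]]
        simp
    · simp only [PySem.Chars.split₀.go, hs, if_false]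
      exact ih _ _

-- with letters already collected (cur ≠ []), the FIRST word is cur.reverse ++ the leading letter run
theorem pv_go_collect (xs : List Char) (cur : List Char) (hcur : cur ≠ []) :
    ∃ tail, PySem.Chars.split₀.go (xs.map pvMaskB) cur [] =
      (cur.reverse ++ xs.takeWhile (fun c => PySem.Chars.isalpha c)) :: tail := by
  induction xs generalizing cur with
  | nil =>
    refine ⟨[], ?_⟩
    simp [PySem.Chars.split₀.go, List.isEmpty_iff, hcur]
  | cons c rest ih =>
    by_cases h : PySem.Chars.isalpha c
    · have hmask : pvMaskB c = c := by simp [pvMaskB, h]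
      obtain ⟨tail, htail⟩ := ih (c :: cur) (by simp)
      refine ⟨tail, ?_⟩
      simp only [List.map_cons, hmask, PySem.Chars.split₀.go, pv_alpha_not_space c h,
        if_false, List.takeWhile_cons, h, if_true]
      rw [htail]; simp
    · have hmask : pvMaskB c = ' ' := by simp [pvMaskB, h]
      refine ⟨PySem.Chars.split₀.go (rest.map pvMaskB) [] [], ?_⟩
      simp only [List.map_cons, hmask, PySem.Chars.split₀.go]
      have hsp : PySem.Chars.isspace ' ' = true := by decide
      simp only [hsp, if_true, List.isEmpty_iff, hcur, if_false]
      rw [pv_go_append]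
      simp [List.takeWhile_cons, h]
  termination_by xs.length

-- B's first token of the masked string is exactly the dropWhile/takeWhile extraction
theorem pv_split_first (xs : List Char) :
    (match PySem.Chars.split₀ (xs.map pvMaskB) with
      | [] => ([] : List Char)
      | w :: _ => w) =
    ((xs.dropWhile (fun c => !PySem.Chars.isalpha c)).takeWhile (fun c => PySem.Chars.isalpha c)) := by
  induction xs with
  | nil => simp [PySem.Chars.split₀, PySem.Chars.split₀.go]
  | cons c rest ih =>
    by_cases h : PySem.Chars.isalpha c
    · have hmask : pvMaskB c = c := by simp [pvMaskB, h]
      obtain ⟨tail, htail⟩ := pv_go_collect rest [c] (by simp)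
      simp only [PySem.Chars.split₀, List.map_cons, hmask, PySem.Chars.split₀.go,
        pv_alpha_not_space c h, if_false] at *
      rw [htail]
      simp [List.dropWhile_cons, h, List.takeWhile_cons]
    · have hmask : pvMaskB c = ' ' := by simp [pvMaskB, h]
      have hsp : PySem.Chars.isspace ' ' = true := by decide
      simp only [PySem.Chars.split₀, List.map_cons, hmask, PySem.Chars.split₀.go, hsp,
        if_true, List.isEmpty_nil, if_true] at *
      rw [show (List.dropWhile (fun c => !PySem.Chars.isalpha c) (c :: rest)) =
            List.dropWhile (fun c => !PySem.Chars.isalpha c) rest by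
        simp [List.dropWhile_cons, h]]
      exact ih

-- with a nonempty accumulator, A's loop appends exactly the leading letter run
theorem pvLoopA_ne_nil (cs : List Char) (a : Char) (acc : List Char) :
    pvLoopA cs (a :: acc) = (a :: acc) ++ cs.takeWhile (fun c => PySem.Chars.isalpha c) := by
  induction cs generalizing acc with
  | nil => simp [pvLoopA]
  | cons c rest ih =>
    by_cases h : PySem.Chars.isalpha c
    · simp [pvLoopA, h, List.takeWhile_cons, ih]
    · simp [pvLoopA, h, List.takeWhile_cons]

-- with an empty accumulator, A's loop is the dropWhile/takeWhile extraction
theorem pvLoopA_eq (cs : List Char) :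
    pvLoopA cs [] =
      (cs.dropWhile (fun c => !PySem.Chars.isalpha c)).takeWhile (fun c => PySem.Chars.isalpha c) := by
  induction cs with
  | nil => simp [pvLoopA]
  | cons c rest ih =>
    by_cases h : PySem.Chars.isalpha c
    · simp [pvLoopA, h, List.takeWhile_cons, pvLoopA_ne_nil]
    · simp [pvLoopA, h, ih]

-- ===== VERDICT (by name: the statement is the Claim_ definition above) =====
theorem subject_from_course_code_py_spec : Claim_equal_subject_from_course_code_py := by
  intro s _
  unfold Spec_subject_from_course_code_py subject_from_course_code_py subject_from_course_code_py_alt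
  rw [pvLoopA_eq, ← pv_split_first]
  cases PySem.Chars.split₀ ((PySem.Str.upper s).toList.map pvMaskB) <;> rfl
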